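-- pv_equiv track=rewrite | github.com/Mac-Huang/Linux-Kernel-Detector | dataset_builder/build_dataset.py | extract_diff_context
-- ===== SOURCE A (Python) =====
-- def extract_diff_context(diff_text, context_lines=5):
--     if not diff_text:
--         return ""
--     lines = diff_text.split('\n')
--     change_lines = [i for i, line in enumerate(lines) if line.startswith('+') or line.startswith('-')]
--     if not change_lines:
--         return diff_text
--     start = max(0, change_lines[0] - context_lines)
--     end = min(len(lines), change_lines[-1] + context_lines + 1)
--     return '\n'.join(lines[start:end])
-- ===== SOURCE B (Python) =====
-- def extract_diff_context(diff_text, context_lines=5):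
--     if not diff_text:
--         return ""
--     lines = diff_text.split('\n')
--
--     def is_change(line):
--         return line.startswith('+') or line.startswith('-')
--
--     first = None
--     for i, line in enumerate(lines):
--         if is_change(line):
--             first = i
--             break
--     if first is None:
--         return diff_text
--
--     last = first
--     for k, line in enumerate(reversed(lines)):
--         if is_change(line):
--             last = len(lines) - 1 - k
--             break
--
--     start = max(0, first - context_lines)
--     end = min(len(lines), last + context_lines + 1)
--     return '\n'.join(lines[start:end])
-- ===== Notes on version B (the rewrite author's own statement) =====
-- stated objective: alternative
-- what changed: Replaces building the full list of change-line indices with two early-terminating directed scans: a forward scan for the first '+'/'-' line and a backward scan over the reversed lines for the last one.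
import Mathlib
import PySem

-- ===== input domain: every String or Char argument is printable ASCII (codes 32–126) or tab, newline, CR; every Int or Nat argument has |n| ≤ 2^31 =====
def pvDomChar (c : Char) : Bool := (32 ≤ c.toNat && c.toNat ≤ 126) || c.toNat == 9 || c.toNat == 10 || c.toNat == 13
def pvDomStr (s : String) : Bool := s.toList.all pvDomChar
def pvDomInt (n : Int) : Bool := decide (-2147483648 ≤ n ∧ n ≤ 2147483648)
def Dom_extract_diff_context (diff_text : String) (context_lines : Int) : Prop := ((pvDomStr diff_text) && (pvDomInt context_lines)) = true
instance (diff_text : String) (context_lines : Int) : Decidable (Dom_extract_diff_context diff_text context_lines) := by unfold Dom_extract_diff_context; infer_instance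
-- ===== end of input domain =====

-- B replaces A's full list of change-line indices by two early-terminating directed
-- scans (forward for the first '+'/'-' line, backward over the reversed lines for the
-- last); same cost class, different decomposition ("alternative").

-- ===== PORT A =====
-- shared predicate: line.startswith('+') or line.startswith('-')
def pvIsChange (l : String) : Bool :=
  PySem.Str.startswith l "+" || PySem.Str.startswith l "-"

def extract_diff_context (diff_text : String) (context_lines : Int) : String :=
  if diff_text = "" then ""
  else
    let lines := (PySem.Str.split? diff_text "\n").getD []   -- sep ≠ "", never none
    let change_lines :=
      ((PySem.List.enumerate lines).filter (fun p => pvIsChange p.2)).map (·.1)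
    if change_lines = [] then diff_text
    else
      let start := max 0 (PySem.List.pyGetD change_lines 0 0 - context_lines)
      let stop := min (lines.length : Int)
        (PySem.List.pyGetD change_lines (-1) 0 + context_lines + 1)
      PySem.Str.join "\n" (PySem.List.slice lines (some start) (some stop))

-- ===== PORT B =====
-- forward scan carrying the running index: first hit wins
def pvFindChangeFrom : List String → Int → Option Int
  | [], _ => none
  | l :: ls, i => if pvIsChange l then some i else pvFindChangeFrom ls (i + 1)

def extract_diff_context_alt (diff_text : String) (context_lines : Int) : String :=
  if diff_text = "" then ""
  else
    let lines := (PySem.Str.split? diff_text "\n").getD []   -- sep ≠ "", never none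
    match pvFindChangeFrom lines 0 with
    | none => diff_text
    | some first =>
      let last :=
        match pvFindChangeFrom lines.reverse 0 with
        | some k => (lines.length : Int) - 1 - k
        | none => first
      let start := max 0 (first - context_lines)
      let stop := min (lines.length : Int) (last + context_lines + 1)
      PySem.Str.join "\n" (PySem.List.slice lines (some start) (some stop))

-- ===== PRECONDITION & SPEC =====
def Spec_extract_diff_context (diff_text : String) (context_lines : Int) (out : String) : Prop := out = extract_diff_context_alt diff_text context_lines
instance (diff_text : String) (context_lines : Int) (out : String) : Decidable (Spec_extract_diff_context diff_text context_lines out) := by unfold Spec_extract_diff_context; infer_instance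

-- ===== CLAIM (what is proved, stated in full; the proofs are below) =====
def Claim_equal_extract_diff_context : Prop := ∀ (diff_text : String) (context_lines : Int), Dom_extract_diff_context diff_text context_lines → Spec_extract_diff_context diff_text context_lines (extract_diff_context diff_text context_lines)

-- ===== LEMMAS AND PROOFS =====

-- the head of A's index list is B's forward scan
theorem head?_changeIdx (ls : List String) (s : Int) :
    (((PySem.List.enumerate ls s).filter (fun p => pvIsChange p.2)).map (·.1)).head?
      = pvFindChangeFrom ls s := by
  induction ls generalizing s with
  | nil => simp [PySem.List.enumerate, pvFindChangeFrom]
  | cons l ls ih =>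
    rw [PySem.List.enumerate_cons]
    by_cases h : pvIsChange l = true <;>
      simp [List.filter, h, pvFindChangeFrom, ih]

theorem enumerate_append (xs ys : List String) (s : Int) :
    PySem.List.enumerate (xs ++ ys) s
      = PySem.List.enumerate xs s ++ PySem.List.enumerate ys (s + xs.length) := by
  induction xs generalizing s with
  | nil => simp [PySem.List.enumerate]
  | cons x xs ih =>
    simp [PySem.List.enumerate_cons, ih]
    ring_nf

theorem enumerate_reverse (ls : List String) (s : Int) :
    (PySem.List.enumerate ls s).reverse
      = (PySem.List.enumerate ls.reverse 0).map
          (fun p => (s + (ls.length : Int) - 1 - p.1, p.2)) := by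
  induction ls generalizing s with
  | nil => simp [PySem.List.enumerate]
  | cons l ls ih =>
    have hfg : (fun p : Int × String => (s + 1 + (ls.length : Int) - 1 - p.1, p.2))
        = (fun p : Int × String => (s + ((l :: ls).length : Int) - 1 - p.1, p.2)) := by
      funext p
      simp only [List.length_cons, Prod.mk.injEq]
      push_cast
      exact ⟨by ring, trivial⟩
    rw [PySem.List.enumerate_cons, List.reverse_cons, ih, List.reverse_cons,
        enumerate_append, List.map_append, hfg]
    congr 1
    simp [PySem.List.enumerate]
    ring_nf

-- the last of A's index list is B's backward scan
theorem getLast?_changeIdx (ls : List String) :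
    (((PySem.List.enumerate ls).filter (fun p => pvIsChange p.2)).map (·.1)).getLast?
      = (pvFindChangeFrom ls.reverse 0).map (fun k => (ls.length : Int) - 1 - k) := by
  rw [List.getLast?_eq_head?_reverse, ← List.map_reverse, ← List.filter_reverse]
  rw [show (PySem.List.enumerate ls).reverse = (PySem.List.enumerate ls 0).reverse from rfl,
      enumerate_reverse ls 0]
  rw [List.filter_map, List.map_map]
  have hfilter : ((PySem.List.enumerate ls.reverse 0).filter
      ((fun p => pvIsChange p.2) ∘ (fun p : Int × String => ((0:Int) + (ls.length : Int) - 1 - p.1, p.2))))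
      = (PySem.List.enumerate ls.reverse 0).filter (fun p => pvIsChange p.2) := by
    apply List.filter_congr; intro p _; rfl
  rw [hfilter]
  have := head?_changeIdx ls.reverse 0
  rw [List.head?_map] at this ⊢
  cases h : ((PySem.List.enumerate ls.reverse 0).filter (fun p => pvIsChange p.2)).head? with
  | none => rw [h] at this; simp [← this]
  | some p =>
    rw [h] at this
    simp only [Option.map_some] at this ⊢
    rw [← this]
    simp only [Function.comp, Option.map_some]
    congr 1
    ring

theorem pyGetD_zero {α : Type} (a : α) (t : List α) (d : α) :
    PySem.List.pyGetD (a :: t) 0 d = a := by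
  simp [PySem.List.pyGetD, PySem.List.pyGet?, PySem.List.pyIdx?]

theorem pyGetD_neg_one {α : Type} (xs : List α) (d : α) (h : xs ≠ []) :
    PySem.List.pyGetD xs (-1) d = xs.getLast h := by
  have hlen : 0 < xs.length := List.length_pos_of_ne_nil h
  simp only [PySem.List.pyGetD, PySem.List.pyGet?, PySem.List.pyIdx?]
  rw [if_neg (by omega), if_pos (by omega : -(xs.length : Int) ≤ -1)]
  simp only [Option.bind]
  rw [List.getElem?_eq_getElem (by omega)]
  simp only [Option.getD_some]
  rw [List.getLast_eq_getElem]
  norm_num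

-- ===== VERDICT (by name: the statement is the Claim_ definition above) =====
theorem extract_diff_context_spec : Claim_equal_extract_diff_context := by
  intro diff_text context_lines _
  unfold Spec_extract_diff_context extract_diff_context extract_diff_context_alt
  by_cases he : diff_text = ""
  · simp [he]
  · simp only [if_neg he]
    set lines := (PySem.Str.split? diff_text "\n").getD [] with hl
    set cl := ((PySem.List.enumerate lines).filter (fun p => pvIsChange p.2)).map (·.1) with hcl
    have hhead : cl.head? = pvFindChangeFrom lines 0 := head?_changeIdx lines 0
    have hlast := getLast?_changeIdx lines
    cases hc : cl with
    | nil =>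
      rw [hc] at hhead
      simp only [List.head?_nil] at hhead
      rw [← hhead]
      simp
    | cons a t =>
      rw [← hcl, hc] at hlast
      rw [hc] at hhead
      simp only [List.head?_cons] at hhead
      rw [← hhead]
      have hne : (a :: t) ≠ ([] : List Int) := by simp
      have hgl : (a :: t).getLast hne = PySem.List.pyGetD (a :: t) (-1) 0 :=
        (pyGetD_neg_one _ 0 hne).symm
      rw [List.getLast?_eq_some_getLast hne, hgl] at hlast
      cases hr : pvFindChangeFrom lines.reverse 0 with
      | none => rw [hr] at hlast; simp at hlast
      | some k =>
        rw [hr] at hlast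
        simp only [Option.map_some, Option.some.injEq] at hlast
        simp only [if_neg (by simp : ¬ (a :: t) = ([] : List Int))]
        rw [hlast, pyGetD_zero]
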